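-- pv_equiv track=rewrite | github.com/zhourunlong/CASCADE_public | project/utils/utils.py | find_unique_prefixes
-- ===== SOURCE A (Python) =====
-- def find_unique_prefixes(all_tokens):
--     """
--     Returns the first position where all tokens have unique prefixes.
--     This position is the first token to generate.
--     """
--     start_pos = 1
--     while True:
--         prefixes = [tuple(tokens[:start_pos]) for tokens in all_tokens]
--         if len(set(prefixes)) == len(all_tokens):
--             break
--         start_pos += 1
--     return start_pos
-- ===== SOURCE B (Python) =====
-- def _lcp_len(a, b):
--     n = 0
--     for x, y in zip(a, b):
--         if x != y:
--             break
--         n += 1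
--     return n
--
--
-- def find_unique_prefixes(all_tokens):
--     """
--     Returns the first position where all tokens have unique prefixes.
--     Sort the sequences; prefixes of length k are all distinct iff k exceeds
--     every adjacent pair's longest common prefix in sorted order.
--     """
--     ts = sorted(tuple(t) for t in all_tokens)
--     best = 0
--     for a, b in zip(ts, ts[1:]):
--         best = max(best, _lcp_len(a, b))
--     return best + 1
-- ===== Notes on version B (the rewrite author's own statement) =====
-- stated objective: faster
-- what changed: Instead of re-hashing all prefixes of growing length k until they become distinct, B sorts the sequences once and returns 1 + the maximum longest-common-prefix length over adjacent sorted pairs; intended as faster (asymptotic; a timing run saw A time out where B returned but measured no clean ratio).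
import Mathlib
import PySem

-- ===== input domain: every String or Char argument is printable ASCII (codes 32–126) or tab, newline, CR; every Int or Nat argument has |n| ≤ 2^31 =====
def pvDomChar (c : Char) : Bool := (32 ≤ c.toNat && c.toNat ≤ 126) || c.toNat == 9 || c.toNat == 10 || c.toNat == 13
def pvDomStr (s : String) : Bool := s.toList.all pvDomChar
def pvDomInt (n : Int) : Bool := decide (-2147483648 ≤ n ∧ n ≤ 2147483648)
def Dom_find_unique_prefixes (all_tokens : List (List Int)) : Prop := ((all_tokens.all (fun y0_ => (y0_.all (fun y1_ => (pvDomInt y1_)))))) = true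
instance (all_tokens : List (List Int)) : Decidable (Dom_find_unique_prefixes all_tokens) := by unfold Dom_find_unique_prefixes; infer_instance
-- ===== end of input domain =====

-- B replaces A's grow-k-and-rehash-all-prefixes loop by one sort plus a scan of adjacent
-- longest-common-prefix lengths; intended as faster (asymptotic change; a timing run saw A
-- time out at its largest size where B returned, but could not measure a clean ratio).


-- ===== PORT A =====
-- tokens[:start_pos] (start_pos ≥ 1) is List.take (PySem.List.slice_to); set(prefixes) is PySem.Set.ofList.
-- 'while True' is ported with explicit fuel maxLen+1: under Pre_ (pairwise-distinct sequences) the break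
-- condition holds by start_pos = maxLen at the latest (the prefixes are then the full, distinct, sequences),
-- so the fuel is never exhausted (proved below); on inputs with duplicate sequences Python A loops forever
-- (those inputs are excluded by Pre_).
def pvMaxLenA (all_tokens : List (List Int)) : Nat := (all_tokens.map List.length).foldr max 0

def pvLoopA (all_tokens : List (List Int)) : Nat → Nat → Nat
  | 0, start_pos => start_pos
  | fuel+1, start_pos =>
      -- prefixes = [tuple(tokens[:start_pos]) for tokens in all_tokens]; len(set(prefixes)) == len(all_tokens)
      if (PySem.Set.ofList (all_tokens.map (fun tokens => tokens.take start_pos))).length = all_tokens.length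
      then start_pos
      else pvLoopA all_tokens fuel (start_pos + 1)

def find_unique_prefixes (all_tokens : List (List Int)) : Int :=
  (pvLoopA all_tokens (pvMaxLenA all_tokens + 1) 1 : Int)

-- ===== PORT B =====
-- _lcp_len: 'for x, y in zip(a, b): if x != y: break; n += 1' = structural recursion on the zipped lists
def pvLcpLen : List Int → List Int → Nat
  | x :: xs, y :: ys => if x = y then pvLcpLen xs ys + 1 else 0
  | _, _ => 0

-- sorted(tuple(t) for t in all_tokens): a tuple of ints is the List Int itself; ts[1:] = ts.drop 1
-- (PySem.List.slice_from). The comparison instance is spelled out so that it is visibly the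
-- lexicographic order Python uses on tuples of ints (Mathlib's LinearOrder on List Int = List.Lex (· < ·)).
def find_unique_prefixes_alt (all_tokens : List (List Int)) : Int :=
  let ts := @PySem.List.sorted (List Int) (List Int) List.instLinearOrder.toLT LinearOrder.toDecidableLT all_tokens (fun t => t) false
  let best := (List.zip ts (ts.drop 1)).foldl (fun best p => max best (pvLcpLen p.1 p.2)) 0
  (best : Int) + 1

-- ===== PRECONDITION & SPEC =====
-- Pre_ excludes exactly the inputs containing two equal sequences: there Python A's 'while True'
-- loop never terminates (no prefix length separates two equal sequences), so A returns on no such input.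
def Pre_find_unique_prefixes (all_tokens : List (List Int)) : Prop := all_tokens.Nodup
instance (all_tokens : List (List Int)) : Decidable (Pre_find_unique_prefixes all_tokens) := by unfold Pre_find_unique_prefixes; infer_instance

def pvWitness_find_unique_prefixes : List (List Int) := [[1, 2], [1, 3], [7]]

def Spec_find_unique_prefixes (all_tokens : List (List Int)) (out : Int) : Prop := out = find_unique_prefixes_alt all_tokens
instance (all_tokens : List (List Int)) (out : Int) : Decidable (Spec_find_unique_prefixes all_tokens out) := by unfold Spec_find_unique_prefixes; infer_instance

-- ===== CLAIM (what is proved, stated in full; the proofs are below) =====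
def Claim_equal_find_unique_prefixes : Prop := ∀ (all_tokens : List (List Int)), Dom_find_unique_prefixes all_tokens → Pre_find_unique_prefixes all_tokens → Spec_find_unique_prefixes all_tokens (find_unique_prefixes all_tokens)

-- ===== LEMMAS AND PROOFS =====

-- max of pvLcpLen x over a list, and over all (ordered) pairs: the common value both programs compute
def pvInner (x : List Int) (xs : List (List Int)) : Nat := (xs.map (pvLcpLen x)).foldr max 0

def pvPairMax : List (List Int) → Nat
  | [] => 0
  | x :: xs => max (pvInner x xs) (pvPairMax xs)

-- ---- basic pvLcpLen facts ----
theorem pvLcpLen_comm (x y : List Int) : pvLcpLen x y = pvLcpLen y x := by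
  induction x generalizing y with
  | nil => cases y <;> simp [pvLcpLen]
  | cons a xs ih => cases y with
    | nil => simp [pvLcpLen]
    | cons b ys =>
      simp only [pvLcpLen]
      rcases eq_or_ne a b with h | h
      · simp [h, ih ys]
      · simp [h, Ne.symm h]

theorem pvLcpLen_self (x : List Int) : pvLcpLen x x = x.length := by
  induction x with
  | nil => rfl
  | cons a xs ih => simp [pvLcpLen, ih]

theorem pvLcpLen_le_length_left (x y : List Int) : pvLcpLen x y ≤ x.length := by
  induction x generalizing y with
  | nil => cases y <;> simp [pvLcpLen]
  | cons a xs ih => cases y with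
    | nil => simp [pvLcpLen]
    | cons b ys =>
      simp only [pvLcpLen]
      split
      · simpa using ih ys
      · simp

-- take-k agreement of two distinct lists is exactly k ≤ lcp
theorem take_eq_iff_lcp (x y : List Int) (hne : x ≠ y) (k : Nat) :
    x.take k = y.take k ↔ k ≤ pvLcpLen x y := by
  induction x generalizing y k with
  | nil =>
    cases y with
    | nil => simp at hne
    | cons b ys =>
      simp only [pvLcpLen, List.take_nil, Nat.le_zero]
      constructor
      · intro h; cases k with
        | zero => rfl
        | succ k => simp at h
      · intro h; subst h; rfl
  | cons a xs ih =>
    cases y with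
    | nil =>
      simp only [pvLcpLen, List.take_nil, Nat.le_zero]
      constructor
      · intro h; cases k with
        | zero => rfl
        | succ k => simp at h
      · intro h; subst h; rfl
    | cons b ys =>
      cases k with
      | zero => simp [pvLcpLen]
      | succ k =>
        simp only [List.take_succ_cons, pvLcpLen]
        rcases eq_or_ne a b with h | h
        · subst h
          have hne' : xs ≠ ys := by intro h; apply hne; rw [h]
          simp [ih ys hne' k]
        · simp [h]

-- len(set(xs)) == len(xs) iff xs has no duplicates
theorem ofList_length_eq_iff (xs : List (List Int)) :
    (PySem.Set.ofList xs).length = xs.length ↔ xs.Nodup := by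
  constructor
  · intro h
    have hnd := PySem.Set.nodup_ofList xs
    have hsub : ∀ x ∈ PySem.Set.ofList xs, x ∈ xs := fun x hx => (PySem.Set.mem_ofList xs x).mp hx
    have hperm : (PySem.Set.ofList xs).Perm xs :=
      List.Subperm.perm_of_length_le (hnd.subperm hsub) (le_of_eq h.symm)
    exact hperm.nodup_iff.mp hnd
  · intro h
    rw [PySem.Set.ofList_eq_self_of_nodup xs h]

theorem pvInner_lt_iff (x : List Int) (xs : List (List Int)) (k : Nat) (hk : 1 ≤ k) :
    pvInner x xs < k ↔ ∀ y ∈ xs, pvLcpLen x y < k := by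
  induction xs with
  | nil => simpa [pvInner] using hk
  | cons y ys ih =>
    simp only [pvInner, List.map_cons, List.foldr_cons, Nat.max_lt, List.mem_cons] at *
    constructor
    · rintro ⟨h1, h2⟩ z hz
      rcases hz with rfl | hz
      · exact h1
      · exact (ih.mp h2) z hz
    · intro h
      exact ⟨h y (Or.inl rfl), ih.mpr (fun z hz => h z (Or.inr hz))⟩

theorem pvInner_le_length (x : List Int) (xs : List (List Int)) : pvInner x xs ≤ x.length := by
  induction xs with
  | nil => simp [pvInner]
  | cons y ys ihy =>
    simp only [pvInner, List.map_cons, List.foldr_cons, Nat.max_le] at *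
    exact ⟨pvLcpLen_le_length_left x y, ihy⟩

theorem pairwise_take_iff (k : Nat) (hk : 1 ≤ k) :
    ∀ (l : List (List Int)), l.Nodup →
    (l.Pairwise (fun a b => a.take k ≠ b.take k) ↔ pvPairMax l < k) := by
  intro l
  induction l with
  | nil => intro _; simpa [pvPairMax] using hk
  | cons x xs ihl =>
    intro hnd
    rw [List.nodup_cons] at hnd
    rw [List.pairwise_cons]
    simp only [pvPairMax, Nat.max_lt]
    rw [ihl hnd.2, pvInner_lt_iff x xs k hk]
    constructor
    · rintro ⟨h1, h2⟩
      refine ⟨?_, h2⟩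
      intro y hy
      have hne : x ≠ y := by rintro rfl; exact hnd.1 hy
      by_contra hc
      exact h1 y hy ((take_eq_iff_lcp x y hne k).mpr (by omega))
    · rintro ⟨h1, h2⟩
      refine ⟨?_, h2⟩
      intro y hy heq
      have hne : x ≠ y := by rintro rfl; exact hnd.1 hy
      have := (take_eq_iff_lcp x y hne k).mp heq
      have := h1 y hy
      omega

-- the loop condition characterised: the length-k prefixes are distinct iff pvPairMax < k
theorem predA_iff (l : List (List Int)) (hnd : l.Nodup) (k : Nat) (hk : 1 ≤ k) :
    (PySem.Set.ofList (l.map (fun tokens => tokens.take k))).length = l.length ↔ pvPairMax l < k := by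
  have hlen : (l.map (fun tokens => tokens.take k)).length = l.length := by simp
  rw [← hlen, ofList_length_eq_iff]
  have h1 : (l.map (fun tokens => tokens.take k)).Nodup
      ↔ l.Pairwise (fun a b => a.take k ≠ b.take k) := by
    rw [List.Nodup, List.pairwise_map]
  rw [h1]
  exact pairwise_take_iff k hk l hnd

theorem pvPairMax_le_maxLen (l : List (List Int)) : pvPairMax l ≤ pvMaxLenA l := by
  induction l with
  | nil => simp [pvPairMax, pvMaxLenA]
  | cons x xs ih =>
    simp only [pvPairMax, pvMaxLenA, List.map_cons, List.foldr_cons, Nat.max_le]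
    have hin := pvInner_le_length x xs
    simp only [pvMaxLenA] at ih
    omega

-- A's loop returns pvPairMax l + 1 (the least start_pos ≥ 1 passing the test)
theorem loopA_eq (l : List (List Int)) (hnd : l.Nodup) :
    ∀ fuel k, 1 ≤ k → k ≤ pvPairMax l + 1 → pvPairMax l + 2 ≤ k + fuel →
    pvLoopA l fuel k = pvPairMax l + 1 := by
  intro fuel
  induction fuel with
  | zero => intro k h1 h2 h3; omega
  | succ f ih =>
    intro k h1 h2 h3
    rw [pvLoopA]
    by_cases hp : (PySem.Set.ofList (l.map (fun tokens => tokens.take k))).length = l.length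
    · rw [if_pos hp]
      have := (predA_iff l hnd k h1).mp hp
      omega
    · rw [if_neg hp]
      have := (predA_iff l hnd k h1).not.mp hp
      exact ih (k+1) (by omega) (by omega) (by omega)

-- pvPairMax is invariant under permutation (so sorting does not change it)
theorem pvInner_perm (x : List Int) {xs ys : List (List Int)} (h : xs.Perm ys) :
    pvInner x xs = pvInner x ys := by
  unfold pvInner
  exact List.Perm.foldr_eq (f := fun a b => max a b) (h.map (pvLcpLen x)) 0

theorem pvPairMax_perm {l l' : List (List Int)} (h : l.Perm l') : pvPairMax l = pvPairMax l' := by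
  induction h with
  | nil => rfl
  | cons x h ih => simp only [pvPairMax, ih, pvInner_perm x h]
  | swap x y t =>
    simp only [pvPairMax, pvInner, List.map_cons, List.foldr_cons]
    rw [pvLcpLen_comm y x]
    omega
  | trans h1 h2 ih1 ih2 => omega

-- the sortedness argument: a < b < c lexicographically → lcp(a,c) ≤ lcp(a,b)
theorem lex_lcp (a b : List Int) (hab : List.Lex (· < ·) a b) :
    ∀ c, List.Lex (· < ·) b c → pvLcpLen a c ≤ pvLcpLen a b := by
  induction hab with
  | nil => intro c _; simp [pvLcpLen]
  | @cons x l₁ l₂ h ih =>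
    intro c hbc
    cases hbc with
    | cons h2 =>
      have := ih _ h2
      simp [pvLcpLen]
      omega
    | rel hr =>
      simp [pvLcpLen, if_neg (ne_of_lt hr)]
  | @rel x y l₁ l₂ hr =>
    intro c hbc
    cases hbc with
    | cons h2 => simp [pvLcpLen, if_neg (ne_of_lt hr)]
    | rel hr2 => simp [pvLcpLen, if_neg (ne_of_lt (lt_trans hr hr2))]

theorem lcp_mono (a b c : List Int)
    (hab : List.Lex (· < ·) a b ∨ a = b) (hbc : List.Lex (· < ·) b c ∨ b = c) :
    pvLcpLen a c ≤ pvLcpLen a b := by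
  rcases hab with hab | rfl
  · rcases hbc with hbc | rfl
    · exact lex_lcp a b hab c hbc
    · exact le_refl _
  · rw [pvLcpLen_self]
    exact pvLcpLen_le_length_left a c

theorem pvInner_le_of (x : List Int) (xs : List (List Int)) (m : Nat)
    (h : ∀ z ∈ xs, pvLcpLen x z ≤ m) : pvInner x xs ≤ m := by
  induction xs with
  | nil => simp [pvInner]
  | cons y ys ih =>
    simp only [pvInner, List.map_cons, List.foldr_cons, Nat.max_le] at *
    exact ⟨h y List.mem_cons_self, ih (fun z hz => h z (List.mem_cons_of_mem y hz))⟩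

-- on a lex-sorted list, B's adjacent-pairs fold computes the all-pairs maximum
theorem foldl_adj_sorted : ∀ (s : List (List Int)),
    s.Pairwise (fun a b => List.Lex (· < ·) a b ∨ a = b) → ∀ acc : Nat,
    (List.zip s (s.drop 1)).foldl (fun best p => max best (pvLcpLen p.1 p.2)) acc
      = max acc (pvPairMax s) := by
  intro s
  induction s with
  | nil => intro _ acc; simp [pvPairMax]
  | cons x t ih =>
    intro hp acc
    rw [List.pairwise_cons] at hp
    cases t with
    | nil => simp [pvPairMax, pvInner]
    | cons y r =>
      have hxy : List.Lex (· < ·) x y ∨ x = y := hp.1 y (List.mem_cons_self)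
      have hyr : ∀ z ∈ r, List.Lex (· < ·) y z ∨ y = z :=
        fun z hz => (List.pairwise_cons.mp hp.2).1 z hz
      have hinner : pvInner x (y :: r) ≤ pvLcpLen x y := by
        apply pvInner_le_of
        intro z hz
        rcases List.mem_cons.mp hz with rfl | hz
        · exact le_refl _
        · exact lcp_mono x y z hxy (hyr z hz)
      have hih := ih hp.2 (max acc (pvLcpLen x y))
      simp only [List.drop_succ_cons, List.drop_zero] at *
      rw [List.zip_cons_cons, List.foldl_cons]
      simp only [pvPairMax] at *
      rw [hih]
      have h2 : pvLcpLen x y ≤ pvInner x (y :: r) := by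
        simp only [pvInner, List.map_cons, List.foldr_cons]
        exact le_max_left _ _
      omega

-- ===== VERDICT (by name: the statement is the Claim_ definition above) =====
theorem find_unique_prefixes_spec : Claim_equal_find_unique_prefixes := by
  intro l _ hnd
  unfold Spec_find_unique_prefixes find_unique_prefixes find_unique_prefixes_alt
  have hA : pvLoopA l (pvMaxLenA l + 1) 1 = pvPairMax l + 1 := by
    apply loopA_eq l hnd
    · exact le_refl 1
    · omega
    · have := pvPairMax_le_maxLen l; omega
  have hsperm := @PySem.List.sorted_perm (List Int) (List Int) List.instLinearOrder.toLT LinearOrder.toDecidableLT l (fun t => t) false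
  have hpw : (@PySem.List.sorted (List Int) (List Int) List.instLinearOrder.toLT LinearOrder.toDecidableLT l (fun t => t) false).Pairwise
      (fun a b => List.Lex (· < ·) a b ∨ a = b) :=
    (PySem.List.sorted_pairwise l (fun t => t)).imp (fun h => lt_or_eq_of_le h)
  have h2 := foldl_adj_sorted (@PySem.List.sorted (List Int) (List Int) List.instLinearOrder.toLT LinearOrder.toDecidableLT l (fun t => t) false) hpw 0
  simp only [hA, h2, pvPairMax_perm hsperm, Nat.zero_max]
  push_cast
  ring
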